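-- pv_equiv track=rewrite | github.com/swanyriver/BASH | vim/super_quick_fix/qf_maker.py | parseRg
-- ===== SOURCE A (Python) =====
-- def parseRg(output):
--   qflist = []
--   filename = ""
--
--   #output is like:
--   #filename
--   #line:col: text
--   #line:col: text
--   #<blank>
--   #filename
--   for line in output:
--     if not line:
--       filename = ""
--       continue
--     if not filename:
--       filename=line
--       continue
--
--     qflist.append(filename + ":" + line)
--
--   return qflist
-- ===== SOURCE B (Python) =====
-- def parseRg(output):
--   # Phase 1: split into maximal runs of non-empty lines (blocks).
--   blocks = []
--   cur = []
--   for line in output: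
--     if line:
--       cur.append(line)
--     elif cur:
--       blocks.append(cur)
--       cur = []
--   if cur:
--     blocks.append(cur)
--   # Phase 2: first line of each block is the filename; render the rest.
--   return [b[0] + ":" + l for b in blocks for l in b[1:]]
-- ===== Notes on version B (the rewrite author's own statement) =====
-- stated objective: alternative
-- what changed: Replaces the flag-threaded single pass with a two-phase decomposition: first group lines into maximal non-empty blocks, then render each block's tail prefixed by its first line.
import Mathlib
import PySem

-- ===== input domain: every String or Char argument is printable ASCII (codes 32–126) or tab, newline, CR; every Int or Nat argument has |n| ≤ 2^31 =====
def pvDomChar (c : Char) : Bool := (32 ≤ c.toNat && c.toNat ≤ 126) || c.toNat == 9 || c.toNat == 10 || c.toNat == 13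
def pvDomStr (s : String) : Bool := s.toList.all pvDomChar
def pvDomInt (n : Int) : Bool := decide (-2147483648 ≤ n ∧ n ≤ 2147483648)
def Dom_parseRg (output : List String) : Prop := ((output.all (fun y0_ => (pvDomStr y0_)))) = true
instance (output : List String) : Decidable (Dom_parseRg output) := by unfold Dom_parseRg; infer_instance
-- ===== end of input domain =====

-- B replaces A's flag-threaded single pass by a two-phase decomposition (group into blocks, then render); same cost, alternative structure.

-- ===== PORT A =====
def pvStepA (st : List String × String) (line : String) : List String × String :=
  if line = "" then (st.1, "")
  else if st.2 = "" then (st.1, line)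
  else (st.1 ++ [st.2 ++ ":" ++ line], st.2)

def parseRg (output : List String) : List String :=
  (output.foldl pvStepA ([], "")).1

-- ===== PORT B =====
def pvStepB (st : List (List String) × List String) (line : String) : List (List String) × List String :=
  if line ≠ "" then (st.1, st.2 ++ [line])
  else if st.2 ≠ [] then (st.1 ++ [st.2], [])
  else st

def pvBlocks (output : List String) : List (List String) :=
  let st := output.foldl pvStepB ([], [])
  if st.2 ≠ [] then st.1 ++ [st.2] else st.1

def pvRender (b : List String) : List String :=
  (b.drop 1).map (fun l => b.headD "" ++ ":" ++ l)

def parseRg_alt (output : List String) : List String :=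
  (pvBlocks output).flatMap pvRender

-- ===== PRECONDITION & SPEC =====
def Spec_parseRg (output : List String) (out : List String) : Prop := out = parseRg_alt output
instance (output : List String) (out : List String) : Decidable (Spec_parseRg output out) := by unfold Spec_parseRg; infer_instance

-- ===== CLAIM (what is proved, stated in full; the proofs are below) =====
def Claim_equal_parseRg : Prop := ∀ (output : List String), Dom_parseRg output → Spec_parseRg output (parseRg output)

-- ===== LEMMAS AND PROOFS =====

-- Loop invariant: A's accumulated quickfix list is the rendering of B's blocks so far
-- plus the rendering of the current (partial) block, and A's filename is that block's head.
theorem pvLoop (output : List String) (blocks : List (List String)) (cur : List String)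
    (h : cur.headD "" = "" → cur = []) :
    (output.foldl pvStepA (blocks.flatMap pvRender ++ pvRender cur, cur.headD "")).1
    = (let st := output.foldl pvStepB (blocks, cur)
       if st.2 ≠ [] then st.1 ++ [st.2] else st.1).flatMap pvRender := by
  induction output generalizing blocks cur with
  | nil =>
    simp only [List.foldl_nil]
    by_cases hc : cur = []
    · subst hc; simp [pvRender]
    · simp [hc, pvRender]
  | cons line rest ih =>
    simp only [List.foldl_cons]
    by_cases hl : line = ""
    · subst hl
      by_cases hc : cur = []
      · subst hc
        have := ih blocks [] (by simp)
        simpa [pvStepA, pvStepB, pvRender] using this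
      · have := ih (blocks ++ [cur]) [] (by simp)
        simpa [pvStepA, pvStepB, hc, pvRender] using this
    · by_cases hc : cur = []
      · subst hc
        have := ih blocks [line] (by intro hx; exact absurd hx hl)
        simpa [pvStepA, pvStepB, hl, pvRender] using this
      · obtain ⟨f, rc, rfl⟩ : ∃ f rc, cur = f :: rc := ⟨cur.head hc, cur.tail, by simp⟩
        have hf : f ≠ "" := by
          intro hx; exact hc (h (by simp [hx]))
        have := ih blocks (f :: (rc ++ [line])) (by simp [hf])
        simpa [pvStepA, pvStepB, hl, hf, pvRender, List.append_assoc] using this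

-- ===== VERDICT (by name: the statement is the Claim_ definition above) =====
theorem parseRg_spec : Claim_equal_parseRg := by
  intro output _
  unfold Spec_parseRg parseRg parseRg_alt pvBlocks
  have := pvLoop output [] [] (by simp)
  simpa [pvRender] using this
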